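-- pv_equiv track=rewrite | github.com/wenbinhuang/MultiThreadDownloader | MultiThreadDownloader.py | size_split
-- ===== SOURCE A (Python) =====
-- def size_split(file_size, divide_num):
--     average = file_size // divide_num
--     result = []
--     if file_size:
--         for i in range(divide_num):
--             if i != divide_num - 1:
--                 result.append((average * i, average * (i + 1) - 1, average))
--             else:
--                 result.append((average * i, file_size - 1, average + file_size % divide_num))
--     else:
--         result.append((0, 0, 0))
--     return result
-- ===== SOURCE B (Python) =====
-- def size_split(file_size, divide_num):
--     if not file_size:
--         return [(0, 0, 0)]
--     average = file_size // divide_num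
--     bounds = [average * i for i in range(divide_num)] + [file_size]
--     return [(lo, hi - 1, hi - lo) for lo, hi in zip(bounds, bounds[1:])]
-- ===== Notes on version B (the rewrite author's own statement) =====
-- stated objective: simpler
-- what changed: B precomputes the chunk boundary list and zips consecutive boundaries into (start, end, width) triples, eliminating A's in-loop last-chunk branch and modulo arithmetic.
import Mathlib
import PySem

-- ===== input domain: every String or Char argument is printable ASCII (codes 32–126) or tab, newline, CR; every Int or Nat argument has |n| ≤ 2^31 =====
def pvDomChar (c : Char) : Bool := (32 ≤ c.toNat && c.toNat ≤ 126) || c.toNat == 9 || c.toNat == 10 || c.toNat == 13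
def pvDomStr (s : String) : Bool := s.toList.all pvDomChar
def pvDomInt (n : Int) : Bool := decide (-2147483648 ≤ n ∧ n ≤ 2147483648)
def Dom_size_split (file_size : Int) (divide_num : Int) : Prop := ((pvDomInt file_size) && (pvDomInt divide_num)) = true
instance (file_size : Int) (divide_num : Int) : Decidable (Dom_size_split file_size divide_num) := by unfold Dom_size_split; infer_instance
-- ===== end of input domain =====

-- B builds the boundary list once and zips consecutive boundaries into (start, end, width)
-- triples, removing A's in-loop last-chunk branch (objective: simpler).


-- ===== PORT A =====
def size_split (file_size : Int) (divide_num : Int) : List (Int × Int × Int) :=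
  let average := PySem.Int.floordiv file_size divide_num
  if file_size ≠ 0 then
    (PySem.List.pyRange 0 divide_num 1).foldl (fun result i =>
      if i ≠ divide_num - 1 then
        result ++ [(average * i, average * (i + 1) - 1, average)]
      else
        result ++ [(average * i, file_size - 1, average + PySem.Int.mod file_size divide_num)]) []
  else
    [(0, 0, 0)]

-- ===== PORT B =====
def size_split_alt (file_size : Int) (divide_num : Int) : List (Int × Int × Int) :=
  if file_size == 0 then [(0, 0, 0)]
  else
    let average := PySem.Int.floordiv file_size divide_num
    let bounds := (PySem.List.pyRange 0 divide_num 1).map (fun i => average * i) ++ [file_size]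
    (bounds.zip (bounds.drop 1)).map (fun p => (p.1, p.2 - 1, p.2 - p.1))

-- ===== PRECONDITION & SPEC =====
-- A divides by divide_num first thing, so divide_num = 0 raises ZeroDivisionError.
def Pre_size_split (file_size : Int) (divide_num : Int) : Prop := divide_num ≠ 0
instance (file_size : Int) (divide_num : Int) : Decidable (Pre_size_split file_size divide_num) := by unfold Pre_size_split; infer_instance
def pvWitness_size_split : Int × Int := (10, 3)

def Spec_size_split (file_size : Int) (divide_num : Int) (out : List (Int × Int × Int)) : Prop := out = size_split_alt file_size divide_num
instance (file_size : Int) (divide_num : Int) (out : List (Int × Int × Int)) : Decidable (Spec_size_split file_size divide_num out) := by unfold Spec_size_split; infer_instance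

-- ===== CLAIM (what is proved, stated in full; the proofs are below) =====
def Claim_equal_size_split : Prop := ∀ (file_size : Int) (divide_num : Int), Dom_size_split file_size divide_num → Pre_size_split file_size divide_num → Spec_size_split file_size divide_num (size_split file_size divide_num)

-- ===== LEMMAS AND PROOFS =====

theorem size_split_main (fs n : Int) (hn : n ≠ 0) :
    size_split fs n = size_split_alt fs n := by
  by_cases hfs : fs = 0
  · subst hfs
    rcases lt_or_gt_of_ne hn with h | h
    · simp [size_split, size_split_alt]
    · simp [size_split, size_split_alt]
  · set av := PySem.Int.floordiv fs n with hav
    have hbody : (fun (result : List (Int × Int × Int)) (i : Int) =>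
        if i ≠ n - 1 then result ++ [(av * i, av * (i + 1) - 1, av)]
        else result ++ [(av * i, fs - 1, av + PySem.Int.mod fs n)]) =
        (fun result i => result ++ [if i ≠ n - 1 then (av * i, av * (i + 1) - 1, av)
          else (av * i, fs - 1, av + PySem.Int.mod fs n)]) := by
      funext result i; split_ifs <;> rfl
    rcases lt_or_gt_of_ne hn with h | h
    · -- n < 0 : range empty on both sides
      simp [size_split, size_split_alt, hfs, PySem.List.pyRange_one_eq_nil (by omega : n ≤ 0)]
    · -- n > 0
      have hmod : PySem.Int.mod fs n = fs - av * n := by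
        have := PySem.Int.floordiv_mul_add_mod fs n
        rw [← hav] at this; omega
      unfold size_split size_split_alt
      rw [← hav]
      simp only [hfs, if_neg, ne_eq, not_false_eq_true, if_true, beq_iff_eq, hbody,
        PySem.List.foldl_append_singleton_eq_map, List.nil_append]
      apply List.ext_getElem?
      intro k
      simp only [List.getElem?_map, List.zip_eq_zipWith, List.getElem?_zipWith,
        List.getElem?_drop, List.getElem?_append, List.length_map,
        PySem.List.length_pyRange_one, PySem.List.getElem?_pyRange_one]
      have hm0 : (n - 0).toNat = n.toNat := by norm_num
      simp only [Int.sub_zero]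
      rcases lt_trichotomy (k + 1) n.toNat with hk | hk | hk
      · -- interior chunk
        rw [if_pos (by omega : k < n.toNat), if_pos (by omega : 1 + k < n.toNat)]
        simp only [Option.map_some]
        rw [if_pos (by omega : (0 : Int) + (k : Int) ≠ n - 1),
          if_pos (by omega : k < n.toNat), if_pos (by omega : 1 + k < n.toNat)]
        simp only [Option.map_some, Option.some.injEq, Prod.mk.injEq]
        and_intros <;> push_cast <;> ring
      · -- last chunk: k + 1 = n.toNat
        rw [if_pos (by omega : k < n.toNat), if_neg (by omega : ¬ (1 + k < n.toNat)),
          (by omega : 1 + k - n.toNat = 0)]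
        simp only [List.getElem?_cons_zero, Option.map_some]
        rw [if_pos (by omega : k < n.toNat),
          if_neg (by omega : ¬ ((0 : Int) + (k : Int) ≠ n - 1))]
        simp only [Option.map_some, Option.some.injEq, Prod.mk.injEq, hmod]
        have hkn : (k : Int) = n - 1 := by omega
        and_intros <;> push_cast <;> rw [hkn] <;> ring
      · -- past the end: both none
        have h1 : ¬ (k < n.toNat) := by omega
        have h1' : ¬ (1 + k < n.toNat) := by omega
        have h2 : [fs][1 + k - n.toNat]? = none := List.getElem?_eq_none (by simp; omega)
        rcases e : [fs][k - n.toNat]? with _ | v <;> simp [h1, h1', h2]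

-- ===== VERDICT (by name: the statement is the Claim_ definition above) =====
theorem size_split_spec : Claim_equal_size_split := by
  intro fs n _ hpre
  unfold Spec_size_split
  exact size_split_main fs n hpre
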